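-- pv_equiv track=rewrite | github.com/jcraig949jfi/Prometheus | noesis/the_maths/topos_theory.py | pullback_in_set
-- ===== SOURCE A (Python) =====
-- def pullback_in_set(x):
--     """Compute pullback (fiber product) of sets via functions.
--     x = [n_A, n_B, n_C, f_values..., g_values...] where f: A->C, g: B->C.
--     Returns size of pullback. Input: array. Output: integer."""
--     idx = 0
--     n_A = int(abs(x[idx])); idx += 1
--     n_B = int(abs(x[idx])) if idx < len(x) else 1; idx += 1
--     n_C = int(abs(x[idx])) if idx < len(x) else 1; idx += 1
--     n_A = min(max(n_A, 1), 50)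
--     n_B = min(max(n_B, 1), 50)
--     n_C = min(max(n_C, 1), 50)
--     # Read f: A -> C
--     f = []
--     for i in range(n_A):
--         val = int(abs(x[idx])) % n_C if idx < len(x) else i % n_C
--         f.append(val)
--         idx += 1
--     # Read g: B -> C
--     g = []
--     for i in range(n_B):
--         val = int(abs(x[idx])) % n_C if idx < len(x) else i % n_C
--         g.append(val)
--         idx += 1
--     # Pullback = {(a, b) : f(a) = g(b)}
--     count = 0
--     for a in range(n_A):
--         for b in range(n_B):
--             if f[a] == g[b]:
--                 count += 1
--     return int(count)
-- ===== SOURCE B (Python) =====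
-- def pullback_in_set(x):
--     """Pullback size via histograms: tally f and g into count dicts, then
--     sum the products of matching counts (no pairwise scan)."""
--     idx = 0
--     n_A = int(abs(x[idx])); idx += 1
--     n_B = int(abs(x[idx])) if idx < len(x) else 1; idx += 1
--     n_C = int(abs(x[idx])) if idx < len(x) else 1; idx += 1
--     n_A = min(max(n_A, 1), 50)
--     n_B = min(max(n_B, 1), 50)
--     n_C = min(max(n_C, 1), 50)
--     f = []
--     for i in range(n_A):
--         val = int(abs(x[idx])) % n_C if idx < len(x) else i % n_C
--         f.append(val)
--         idx += 1
--     g = []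
--     for i in range(n_B):
--         val = int(abs(x[idx])) % n_C if idx < len(x) else i % n_C
--         g.append(val)
--         idx += 1
--     fcount = {}
--     for v in f:
--         fcount[v] = fcount.get(v, 0) + 1
--     gcount = {}
--     for w in g:
--         gcount[w] = gcount.get(w, 0) + 1
--     return int(sum(cnt * gcount.get(c, 0) for c, cnt in fcount.items()))
-- ===== Notes on version B (the rewrite author's own statement) =====
-- stated objective: alternative
-- what changed: The nested pairwise comparison loop over all (a,b) is replaced by two independent counting passes (histogram dicts of f and g) followed by a single sum of products of matching counts; the input-parsing prologue is kept identical. Since n_A and n_B are clamped to at most 50, parsing dominates and no wall-clock speedup is measurable.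
-- outside the precondition, e.g. on pullback_in_set([]): A raises IndexError, B raises IndexError
import Mathlib
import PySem

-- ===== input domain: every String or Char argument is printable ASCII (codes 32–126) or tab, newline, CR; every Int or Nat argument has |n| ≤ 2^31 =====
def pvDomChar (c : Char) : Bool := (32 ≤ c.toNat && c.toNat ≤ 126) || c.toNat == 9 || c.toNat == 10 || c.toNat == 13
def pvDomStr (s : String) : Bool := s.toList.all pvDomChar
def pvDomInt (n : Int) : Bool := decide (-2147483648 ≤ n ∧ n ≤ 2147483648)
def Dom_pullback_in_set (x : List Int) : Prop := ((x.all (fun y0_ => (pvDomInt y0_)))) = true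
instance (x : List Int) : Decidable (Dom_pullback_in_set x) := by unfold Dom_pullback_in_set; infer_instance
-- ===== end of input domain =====

-- B replaces A's nested pairwise comparison loop by two counting passes and a
-- product-of-counts sum; the parsing prologue (shared helpers below) is identical in both.

-- ===== shared parsing prologue (identical in A and B) =====
def pvClamp (n : Int) : Int := min (max n 1) 50

-- 'val = int(abs(x[idx])) % n_C if idx < len(x) else i % n_C' for i in range(n)
def pvReadVals (x : List Int) (nC : Int) (start n : Nat) : List Int :=
  (List.range n).map (fun i =>
    if start + i < x.length then PySem.Int.mod |PySem.List.pyGetD x (start + i : Nat) 0| nC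
    else PySem.Int.mod (i : Int) nC)

-- parse prologue: returns (n_A, n_B, f, g)
def pvParse (x : List Int) : Int × Int × List Int × List Int :=
  let nA := pvClamp |PySem.List.pyGetD x 0 0|
  let nB := pvClamp (if 1 < x.length then |PySem.List.pyGetD x 1 0| else 1)
  let nC := pvClamp (if 2 < x.length then |PySem.List.pyGetD x 2 0| else 1)
  let f := pvReadVals x nC 3 nA.toNat
  let g := pvReadVals x nC (3 + nA.toNat) nB.toNat
  (nA, nB, f, g)

-- ===== PORT A =====
def pullback_in_set (x : List Int) : Int :=
  let p := pvParse x
  let nA := p.1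
  let nB := p.2.1
  let f := p.2.2.1
  let g := p.2.2.2
  (PySem.List.pyRange 0 nA 1).foldl (fun count a =>
    (PySem.List.pyRange 0 nB 1).foldl (fun count b =>
      if PySem.List.pyGetD f a 0 = PySem.List.pyGetD g b 0 then count + 1 else count) count) 0

-- ===== PORT B =====
def pullback_in_set_alt (x : List Int) : Int :=
  let p := pvParse x
  let f := p.2.2.1
  let g := p.2.2.2
  let fcount := f.foldl (fun d v => d.insert v (d.getD v 0 + 1)) PySem.Dict.empty
  let gcount := g.foldl (fun d w => d.insert w (d.getD w 0 + 1)) PySem.Dict.empty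
  fcount.items.foldl (fun s cv => s + cv.2 * gcount.getD cv.1 0) 0

-- ===== PRECONDITION & SPEC =====
-- Pre_ excludes only the empty list, on which A's 'x[0]' raises IndexError.
def Pre_pullback_in_set (x : List Int) : Prop := x ≠ []
instance (x : List Int) : Decidable (Pre_pullback_in_set x) := by unfold Pre_pullback_in_set; infer_instance
def pvWitness_pullback_in_set : List Int := [2, 2, 3, 1, 2, 1, 1]

def Spec_pullback_in_set (x : List Int) (out : Int) : Prop := out = pullback_in_set_alt x
instance (x : List Int) (out : Int) : Decidable (Spec_pullback_in_set x out) := by unfold Spec_pullback_in_set; infer_instance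

-- ===== CLAIM (what is proved, stated in full; the proofs are below) =====
def Claim_equal_pullback_in_set : Prop := ∀ (x : List Int), Dom_pullback_in_set x → Pre_pullback_in_set x → Spec_pullback_in_set x (pullback_in_set x)

-- ===== LEMMAS AND PROOFS =====

lemma pvSumIte (s : List Int) (v t : Int) (hn : s.Nodup) (hv : v ∈ s) :
    (s.map (fun c => if c = v then t else 0)).sum = t := by
  induction s with
  | nil => cases hv
  | cons a s ih =>
    rcases List.nodup_cons.mp hn with ⟨hna, hns⟩
    by_cases hav : a = v
    · subst hav
      have hz : (s.map (fun c => if c = a then t else 0)).sum = 0 := by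
        apply List.sum_eq_zero
        intro y hy
        rcases List.mem_map.mp hy with ⟨c, hc, rfl⟩
        have : c ≠ a := fun h => hna (h ▸ hc)
        simp [this]
      simp [hz]
    · have hv' : v ∈ s := by
        rcases List.mem_cons.mp hv with h | h
        · exact absurd h.symm hav
        · exact h
      simp [hav, ih hns hv']

lemma pvGroupSum (l : List Int) (h : Int → Int) :
    ((PySem.Set.ofList l).map (fun c => (l.count c : Int) * h c)).sum
      = (l.map h).sum := by
  induction l using List.reverseRecOn with
  | nil => simp
  | append_singleton l v ih =>
    rw [PySem.Set.ofList_append_singleton]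
    by_cases hv : v ∈ PySem.Set.ofList l
    · rw [PySem.Set.add_of_mem hv]
      have hvmem : v ∈ l := (PySem.Set.mem_ofList l v).mp hv
      have hcnt : ∀ c : Int, ((l ++ [v]).count c : Int) = (l.count c : Int) + (if c = v then 1 else 0) := by
        intro c
        rw [List.count_append]
        by_cases hcv : c = v <;> simp [hcv, List.count_eq_zero]
      calc ((PySem.Set.ofList l).map (fun c => ((l ++ [v]).count c : Int) * h c)).sum
          = ((PySem.Set.ofList l).map (fun c => (l.count c : Int) * h c + (if c = v then h c else 0))).sum := by
            apply congrArg
            apply List.map_congr_left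
            intro c hc
            rw [hcnt c]
            by_cases hcv : c = v
            · simp [hcv]; ring
            · simp [hcv]
        _ = ((PySem.Set.ofList l).map (fun c => (l.count c : Int) * h c)).sum
              + ((PySem.Set.ofList l).map (fun c => if c = v then h v else 0)).sum := by
            rw [← List.sum_map_add]
            apply congrArg; apply List.map_congr_left; intro c hc
            by_cases hcv : c = v <;> simp [hcv]
        _ = (l.map h).sum + h v := by
            rw [ih, pvSumIte _ _ _ (PySem.Set.nodup_ofList l) hv]
        _ = ((l ++ [v]).map h).sum := by simp
    · rw [PySem.Set.add_of_not_mem hv]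
      have hvmem : v ∉ l := fun h' => hv ((PySem.Set.mem_ofList l v).mpr h')
      rw [List.map_append, List.sum_append, List.map_append, List.sum_append]
      congr 1
      · rw [← ih]
        apply congrArg; apply List.map_congr_left
        intro c hc
        have : c ≠ v := fun h' => hv (h' ▸ hc)
        rw [List.count_append]
        have h0 : List.count c [v] = 0 := List.count_eq_zero.mpr (by simp [this])
        simp [h0]
      · simp [List.count_eq_zero.mpr hvmem]

lemma pvA_eq (f g : List Int) :
    (PySem.List.pyRange 0 (f.length : Int) 1).foldl (fun count a =>
      (PySem.List.pyRange 0 (g.length : Int) 1).foldl (fun count b =>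
        if PySem.List.pyGetD f a 0 = PySem.List.pyGetD g b 0 then count + 1 else count) count) 0
    = (f.map (fun v => (g.count v : Int))).sum := by
  have hinner : ∀ (v c : Int),
      (PySem.List.pyRange 0 (g.length : Int) 1).foldl (fun count b =>
        if v = PySem.List.pyGetD g b 0 then count + 1 else count) c
      = c + (g.count v : Int) := by
    intro v c
    rw [PySem.List.foldl_pyRange_zero_pyGetD' g 0 (fun count w => if v = w then count + 1 else count) c]
    have h1 : ∀ (acc w : Int), w ∈ g →
        (if v = w then acc + 1 else acc) = (if w == v then acc + 1 else acc) := by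
      intro acc w _
      by_cases hw : v = w
      · simp [hw]
      · simp [hw]
        omega
    rw [PySem.List.foldl_congr_mem (l := g) (init := c)
      (f := fun acc w => if v = w then acc + 1 else acc)
      (g := fun acc w => if w == v then acc + 1 else acc) h1]
    rw [PySem.List.foldl_beq_add_one]
  have h2 : ∀ (acc v : Int), v ∈ f →
      (PySem.List.pyRange 0 (g.length : Int) 1).foldl (fun count b =>
        if v = PySem.List.pyGetD g b 0 then count + 1 else count) acc
      = acc + (g.count v : Int) := by
    intro acc v _
    exact hinner v acc
  rw [PySem.List.foldl_pyRange_zero_pyGetD' f 0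
    (fun count v => (PySem.List.pyRange 0 (g.length : Int) 1).foldl (fun count b =>
        if v = PySem.List.pyGetD g b 0 then count + 1 else count) count) 0]
  rw [PySem.List.foldl_congr_mem (l := f) (init := 0)
    (f := fun count v => (PySem.List.pyRange 0 (g.length : Int) 1).foldl (fun count b =>
        if v = PySem.List.pyGetD g b 0 then count + 1 else count) count)
    (g := fun count v => count + (g.count v : Int)) h2]
  rw [PySem.List.foldl_add]
  simp

lemma pvB_eq (f g : List Int) :
    ((f.foldl (fun d v => d.insert v (d.getD v 0 + 1)) PySem.Dict.empty).items).foldl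
      (fun s cv => s + cv.2 * ((g.foldl (fun d w => d.insert w (d.getD w 0 + 1)) PySem.Dict.empty).getD cv.1 0)) 0
    = ((PySem.Set.ofList f).map (fun c => (f.count c : Int) * (g.count c : Int))).sum := by
  rw [PySem.Dict.foldl_insert_getD_add_one_eq_counter, PySem.Dict.foldl_insert_getD_add_one_eq_counter]
  rw [PySem.List.foldl_add (g := fun cv : Int × Int => cv.2 * ((PySem.Dict.counter g).getD cv.1 0))]
  rw [PySem.Dict.items_counter]
  simp only [List.map_map]
  rw [zero_add]
  apply congrArg
  apply List.map_congr_left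
  intro c hc
  simp [PySem.Dict.getD_counter]

lemma pvClamp_pos (n : Int) : 1 ≤ pvClamp n := by
  unfold pvClamp; omega

lemma pvReadVals_length (x : List Int) (nC : Int) (start n : Nat) :
    (pvReadVals x nC start n).length = n := by
  simp [pvReadVals]

-- ===== VERDICT =====
theorem pullback_in_set_spec : Claim_equal_pullback_in_set := by
  intro x _ _
  unfold Spec_pullback_in_set pullback_in_set pullback_in_set_alt
  have hf : (pvParse x).2.2.1.length = (pvParse x).1.toNat := by
    simp [pvParse, pvReadVals_length]
  have hg : (pvParse x).2.2.2.length = (pvParse x).2.1.toNat := by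
    simp [pvParse, pvReadVals_length]
  have hA : 1 ≤ (pvParse x).1 := by
    simp only [pvParse]
    exact pvClamp_pos _
  have hB : 1 ≤ (pvParse x).2.1 := by
    simp only [pvParse]
    exact pvClamp_pos _
  have e1 : (pvParse x).1 = ((pvParse x).2.2.1.length : Int) := by rw [hf]; omega
  have e2 : (pvParse x).2.1 = ((pvParse x).2.2.2.length : Int) := by rw [hg]; omega
  simp only []
  rw [e1, e2, pvA_eq, pvB_eq, pvGroupSum]
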